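-- pv_equiv track=rewrite | github.com/JoachimIsaac/Interview-Preparation | TwoPointerProblems/removeDuplicates.py | removeDuplicatesMyWay
-- ===== SOURCE A (Python) =====
-- def removeDuplicatesMyWay(arr):
--     if len(arr) < 2:
--         return len(arr)
--
--     pointer1 = 0
--     pointer2 = pointer1 + 1
--
--     counter = 0
--
--     while pointer2 < len(arr):
--
--         if arr[pointer1] == arr[pointer2]:  # track all repetitions
--             counter += 1
--             pointer2 += 1
--
--         else:
--             pointer1 = pointer2
--             pointer2 += 1
--
--     return len(arr) - counter
-- ===== SOURCE B (Python) =====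
-- def _dedup(xs):
--     # divide and conquer: deduplicate consecutive runs in each half, then merge
--     if len(xs) < 2:
--         return list(xs)
--     mid = len(xs) // 2
--     left = _dedup(xs[:mid])
--     right = _dedup(xs[mid:])
--     if left[-1] == right[0]:
--         return left + right[1:]
--     return left + right
--
--
-- def removeDuplicatesMyWay(arr):
--     return len(_dedup(arr))
-- ===== Notes on version B (the rewrite author's own statement) =====
-- stated objective: alternative
-- what changed: B deduplicates with a divide-and-conquer recursion that materializes the run-compressed list of each half and merges them (dropping the right head when it equals the left last element), then returns its length, instead of A's linear two-pointer pass counting duplicates and subtracting from the length.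
import Mathlib
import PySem

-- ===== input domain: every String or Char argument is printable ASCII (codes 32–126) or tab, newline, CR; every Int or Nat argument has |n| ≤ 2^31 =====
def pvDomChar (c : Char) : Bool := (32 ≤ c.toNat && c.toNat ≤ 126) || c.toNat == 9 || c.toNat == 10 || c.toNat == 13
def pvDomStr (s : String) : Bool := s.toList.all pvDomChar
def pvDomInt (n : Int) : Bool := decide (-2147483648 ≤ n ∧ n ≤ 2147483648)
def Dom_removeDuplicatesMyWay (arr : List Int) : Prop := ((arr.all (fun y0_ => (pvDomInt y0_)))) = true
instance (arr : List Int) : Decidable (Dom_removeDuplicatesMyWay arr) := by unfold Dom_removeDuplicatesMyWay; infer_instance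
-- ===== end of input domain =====

-- B deduplicates by divide and conquer (dedup each half, merge, return the length of the
-- materialized run-compressed list) instead of A's linear two-pointer duplicate count; objective: alternative.

-- ===== PORT A =====
-- A's while loop: state (pointer1, pointer2, counter); returns counter
-- (arr.getD i 0 is exact here: both indices are always in range while the loop runs)
def pvALoop (arr : List Int) (p1 p2 counter : Nat) : Nat :=
  if p2 < arr.length then
    if arr.getD p1 0 = arr.getD p2 0 then
      pvALoop arr p1 (p2 + 1) (counter + 1)
    else
      pvALoop arr p2 (p2 + 1) counter
  else counter
termination_by arr.length - p2

def removeDuplicatesMyWay (arr : List Int) : Int :=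
  if arr.length < 2 then (arr.length : Int)
  else (arr.length : Int) - (pvALoop arr 0 1 0 : Int)

-- ===== PORT B =====
-- Source B's _dedup: halves are nonempty (len ≥ 2), so left[-1]/right[0] are exactly
-- getLast?/head? compared as options
def pvDedup (xs : List Int) : List Int :=
  if xs.length < 2 then xs
  else
    let mid := xs.length / 2
    let left := pvDedup (xs.take mid)
    let right := pvDedup (xs.drop mid)
    if left.getLast? = right.head? then left ++ right.tail else left ++ right
termination_by xs.length
decreasing_by
  · simp only [List.length_take]; omega
  · simp only [List.length_drop]; omega

def removeDuplicatesMyWay_alt (arr : List Int) : Int := ((pvDedup arr).length : Int)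

-- ===== PRECONDITION & SPEC =====
def Spec_removeDuplicatesMyWay (arr : List Int) (out : Int) : Prop := out = removeDuplicatesMyWay_alt arr
instance (arr : List Int) (out : Int) : Decidable (Spec_removeDuplicatesMyWay arr out) := by unfold Spec_removeDuplicatesMyWay; infer_instance

-- ===== CLAIM (what is proved, stated in full; the proofs are below) =====
def Claim_equal_removeDuplicatesMyWay : Prop := ∀ (arr : List Int), Dom_removeDuplicatesMyWay arr → Spec_removeDuplicatesMyWay arr (removeDuplicatesMyWay arr)

-- ===== LEMMAS AND PROOFS =====

-- reference run-compression (destutter) used only in the proofs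
def pvDest : List Int → List Int
  | [] => []
  | [a] => [a]
  | a :: b :: r => if a = b then pvDest (b :: r) else a :: pvDest (b :: r)

-- number of adjacent equal pairs (what A's counter computes)
def pvDupCnt : List Int → Nat
  | a :: b :: rest => (if a = b then 1 else 0) + pvDupCnt (b :: rest)
  | _ => 0

theorem pvDest_head : ∀ (l : List Int) (a : Int), (pvDest (a :: l)).head? = some a
  | [], _ => rfl
  | b :: r, a => by
    simp only [pvDest]
    split_ifs with h
    · rw [pvDest_head r b, h]
    · rfl

theorem pvDest_ne_nil (l : List Int) (a : Int) : pvDest (a :: l) ≠ [] := by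
  intro h
  have := pvDest_head l a
  rw [h] at this
  simp at this

theorem pvDest_last : ∀ (l : List Int) (a : Int),
    (pvDest (a :: l)).getLast? = (a :: l).getLast?
  | [], _ => rfl
  | b :: r, a => by
    simp only [pvDest]
    split_ifs with h
    · rw [pvDest_last r b]
      simp
    · rw [List.getLast?_cons, pvDest_last r b]
      have hne : (b :: r).getLast? ≠ none := by simp
      cases hg : (b :: r).getLast? with
      | none => exact absurd hg hne
      | some x => simp [hg]

theorem pvDest_merge : ∀ (xs ys : List Int), xs ≠ [] → ys ≠ [] →
    pvDest (xs ++ ys) =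
      if xs.getLast? = ys.head? then pvDest xs ++ (pvDest ys).tail
      else pvDest xs ++ pvDest ys
  | [], _, hx, _ => absurd rfl hx
  | _, [], _, hy => absurd rfl hy
  | [a], b :: r, _, _ => by
    simp only [List.cons_append, List.nil_append, pvDest, List.getLast?_singleton,
      List.head?_cons]
    split_ifs with h h' h'
    · -- a = b : pvDest (b :: r) = [a] ++ (pvDest (b :: r)).tail
      subst h
      have hh := pvDest_head r a
      cases hd : pvDest (a :: r) with
      | nil => exact absurd hd (pvDest_ne_nil r a)
      | cons c t =>
        rw [hd] at hh
        simp at hh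
        simp [hh]
    · exact absurd (by rw [h]) h'
    · exact absurd (Option.some.inj h') h
    · rfl
  | a :: c :: t, ys, _, hy => by
    have hmr := pvDest_merge (c :: t) ys (by simp) hy
    have hl : (a :: c :: t).getLast? = (c :: t).getLast? := by simp
    simp only [List.cons_append]
    show pvDest (a :: c :: (t ++ ys)) = _
    simp only [pvDest, hl]
    by_cases hac : a = c
    · simp only [hac, if_true]
      rw [show c :: (t ++ ys) = (c :: t) ++ ys from rfl, hmr]
    · simp only [hac, if_false]
      rw [show c :: (t ++ ys) = (c :: t) ++ ys from rfl, hmr]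
      split_ifs <;> simp
termination_by xs _ => xs.length

theorem pvDedup_eq (xs : List Int) : pvDedup xs = pvDest xs := by
  rw [pvDedup]
  split_ifs with h
  · match xs, h with
    | [], _ => rfl
    | [a], _ => rfl
  · have hlen : 2 ≤ xs.length := by omega
    have hmid1 : 1 ≤ xs.length / 2 := by omega
    have hmid2 : xs.length / 2 < xs.length := by omega
    have ht := pvDedup_eq (xs.take (xs.length / 2))
    have hd := pvDedup_eq (xs.drop (xs.length / 2))
    have htne : xs.take (xs.length / 2) ≠ [] := by
      intro hnil
      have := congrArg List.length hnil
      simp only [List.length_take, List.length_nil] at this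
      omega
    have hdne : xs.drop (xs.length / 2) ≠ [] := by
      intro hnil
      have := congrArg List.length hnil
      simp only [List.length_drop, List.length_nil] at this
      omega
    simp only [ht, hd]
    have hmerge := pvDest_merge (xs.take (xs.length / 2)) (xs.drop (xs.length / 2)) htne hdne
    rw [List.take_append_drop] at hmerge
    rw [hmerge]
    -- the compared condition: last/head of the pvDest halves equal those of the halves
    obtain ⟨a, l, hx⟩ : ∃ a l, xs.take (xs.length / 2) = a :: l :=
      List.exists_cons_of_ne_nil htne
    obtain ⟨b, r, hy⟩ : ∃ b r, xs.drop (xs.length / 2) = b :: r :=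
      List.exists_cons_of_ne_nil hdne
    rw [hx, hy, pvDest_last, pvDest_head, List.head?_cons]
termination_by xs.length
decreasing_by
  · simp only [List.length_take]; omega
  · simp only [List.length_drop]; omega

theorem pvDest_length : ∀ (l : List Int) (a : Int),
    (pvDest (a :: l)).length + pvDupCnt (a :: l) = l.length + 1
  | [], _ => rfl
  | b :: r, a => by
    have ih := pvDest_length r b
    simp only [pvDest, pvDupCnt]
    split_ifs with h <;> simp only [List.length_cons] <;> omega

theorem pvALoop_eq (arr : List Int) (n : Nat) : ∀ (p2 p1 counter : Nat),
    arr.length - p2 = n → 1 ≤ p2 → p2 ≤ arr.length →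
    arr.getD p1 0 = arr.getD (p2 - 1) 0 →
    pvALoop arr p1 p2 counter = counter + pvDupCnt (arr.drop (p2 - 1)) := by
  induction n with
  | zero =>
    intro p2 p1 counter hn h1 h2 hinv
    have hp2 : p2 = arr.length := by omega
    rw [pvALoop]
    have hd : arr.drop (p2 - 1) = [arr[p2-1]'(by omega)] := by
      rw [List.drop_eq_getElem_cons (by omega)]
      have h3 : p2 - 1 + 1 = arr.length := by omega
      rw [h3, List.drop_length]
    rw [hd]
    simp [hp2, pvDupCnt]
  | succ n ih =>
    intro p2 p1 counter hn h1 h2 hinv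
    have h : p2 < arr.length := by omega
    have hd1 : arr.drop (p2 - 1) = arr[p2 - 1]'(by omega) :: arr.drop p2 := by
      rw [List.drop_eq_getElem_cons (show p2 - 1 < arr.length by omega)]
      have h3 : p2 - 1 + 1 = p2 := by omega
      rw [h3]
    have hd2 : arr.drop p2 = arr[p2] :: arr.drop (p2 + 1) :=
      List.drop_eq_getElem_cons h
    have hg1 : arr.getD (p2 - 1) 0 = arr[p2 - 1]'(by omega) := List.getD_eq_getElem _ _ (by omega)
    have hg2 : arr.getD p2 0 = arr[p2] := List.getD_eq_getElem _ _ h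
    rw [pvALoop]
    simp only [h, if_true]
    by_cases heq : arr.getD p1 0 = arr.getD p2 0
    · simp only [heq, if_true]
      have hrec := ih (p2 + 1) p1 (counter + 1) (by omega) (by omega) (by omega)
        (by simpa using heq)
      rw [hrec, hd1, hd2, pvDupCnt]
      have he : arr[p2 - 1]'(by omega) = arr[p2] := by rw [← hg1, ← hg2, ← hinv, heq]
      rw [show (p2 + 1) - 1 = p2 from rfl, hd2, he]
      simp
      omega
    · simp only [heq, if_false]
      have hrec := ih (p2 + 1) p2 counter (by omega) (by omega) (by omega) (by simp)
      rw [hrec, hd1, hd2, pvDupCnt]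
      have he : ¬ arr[p2 - 1]'(by omega) = arr[p2] := by rw [← hg1, ← hg2, ← hinv]; exact heq
      rw [show (p2 + 1) - 1 = p2 from rfl, hd2]
      simp [he]

-- ===== VERDICT (by name: the statement is the Claim_ definition above) =====
theorem removeDuplicatesMyWay_spec : Claim_equal_removeDuplicatesMyWay := by
  unfold Claim_equal_removeDuplicatesMyWay
  intro arr _
  unfold Spec_removeDuplicatesMyWay removeDuplicatesMyWay removeDuplicatesMyWay_alt
  rw [pvDedup_eq]
  by_cases h : arr.length < 2
  · match arr, h with
    | [], _ => rfl
    | [a], _ => rfl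
  · simp only [h, if_false]
    match arr, h with
    | a :: l, h =>
      have hA := pvALoop_eq (a :: l) ((a :: l).length - 1) 1 0 0 rfl (by omega)
        (by simp only [List.length_cons]; omega) rfl
      have hlen := pvDest_length l a
      simp only [show (1:Nat) - 1 = 0 from rfl, List.drop_zero, Nat.zero_add] at hA
      rw [hA]
      simp only [List.length_cons]
      push_cast
      omega
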